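-- pv_equiv track=rewrite | github.com/AljonViray/Python-Coursework | q4helper/q4solution.py | min_key_order
-- ===== SOURCE A (Python) =====
-- def min_key_order(adict):
--     if not adict:
--         return
--
--     min_value = min(adict)
--     yield min_value,adict[min_value]
--
--     while True:
--         # Scan dict keys, finding min_bigger: the smallest one > min_value
--         min_bigger = None
--         for key in adict:
--             if key > min_value and (min_bigger == None or key < min_bigger):
--                 min_bigger = key
--
--         if min_bigger == None:
--             return
--         else:
--             min_value = min_bigger
--             yield min_value,adict[min_value]
-- ===== SOURCE B (Python) =====
-- def min_key_order(adict):
--     for key in sorted(adict):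
--         yield (key, adict[key])
-- ===== Notes on version B (the rewrite author's own statement) =====
-- stated objective: faster
-- what changed: Replaces A's repeated full-dict min-scan per yielded item (selection-sort style) with a single sorted() over the keys followed by one pass of lookups.
import Mathlib
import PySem

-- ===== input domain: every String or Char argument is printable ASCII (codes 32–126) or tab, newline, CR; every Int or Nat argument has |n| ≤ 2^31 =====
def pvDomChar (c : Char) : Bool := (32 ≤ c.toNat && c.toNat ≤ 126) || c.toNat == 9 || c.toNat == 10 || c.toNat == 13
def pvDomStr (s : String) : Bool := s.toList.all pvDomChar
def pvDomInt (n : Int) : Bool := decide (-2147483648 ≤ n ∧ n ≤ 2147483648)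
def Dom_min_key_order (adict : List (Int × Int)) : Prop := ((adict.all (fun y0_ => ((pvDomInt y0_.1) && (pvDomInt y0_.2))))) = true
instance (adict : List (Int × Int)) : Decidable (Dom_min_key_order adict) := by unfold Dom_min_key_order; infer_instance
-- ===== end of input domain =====

-- B replaces A's repeated full-scan for the next-larger key (O(n^2) selection)
-- with a single sort of the keys followed by one pass of lookups.


-- ===== PORT A =====
-- the inner 'for key in adict' scan looking for the smallest key > m
def pvScanA (m : Int) (ks : List Int) : Option Int :=
  ks.foldl (fun mb key =>
    if m < key && (match mb with | none => true | some b => key < b)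
    then some key else mb) none

-- the 'while True' loop; fuel = number of keys bounds the yields remaining
def pvLoopA (d : PySem.Dict Int Int) (ks : List Int) : Nat → Int → List (Int × Int)
  | 0, _ => []
  | fuel + 1, m =>
    match pvScanA m ks with
    | none => []
    | some b => (b, d.getD b 0) :: pvLoopA d ks fuel b

def min_key_order (adict : List (Int × Int)) : List (Int × Int) :=
  let d := PySem.Dict.ofList adict
  let ks := d.keys
  match PySem.List.min? ks (fun x => x) with
  | none => []
  | some m => (m, d.getD m 0) :: pvLoopA d ks ks.length m

-- ===== PORT B =====
def min_key_order_alt (adict : List (Int × Int)) : List (Int × Int) :=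
  let d := PySem.Dict.ofList adict
  (PySem.List.sorted d.keys (fun x => x) false).map (fun k => (k, d.getD k 0))

-- ===== PRECONDITION & SPEC =====
def Spec_min_key_order (adict : List (Int × Int)) (out : List (Int × Int)) : Prop := out = min_key_order_alt adict
instance (adict : List (Int × Int)) (out : List (Int × Int)) : Decidable (Spec_min_key_order adict out) := by unfold Spec_min_key_order; infer_instance

-- ===== CLAIM (what is proved, stated in full; the proofs are below) =====
def Claim_equal_min_key_order : Prop := ∀ (adict : List (Int × Int)), Dom_min_key_order adict → Spec_min_key_order adict (min_key_order adict)

-- ===== LEMMAS AND PROOFS =====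

-- Option-valued minimum combinator and its list fold
def pvOmin (a b : Option Int) : Option Int :=
  match a, b with
  | none, b => b
  | a, none => a
  | some x, some y => some (min x y)

def pvM (l : List Int) : Option Int := l.foldr (fun x o => pvOmin (some x) o) none

theorem pvOmin_assoc (a b c : Option Int) : pvOmin (pvOmin a b) c = pvOmin a (pvOmin b c) := by
  cases a <;> cases b <;> cases c <;> simp [pvOmin, min_assoc]

theorem pvScanA_foldl_eq (m : Int) : ∀ (ks : List Int) (acc : Option Int),
    ks.foldl (fun mb key =>
      if m < key && (match mb with | none => true | some b => key < b)
      then some key else mb) acc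
      = pvOmin acc (pvM (ks.filter (fun k => decide (m < k)))) := by
  intro ks
  induction ks with
  | nil => intro acc; simp [pvM, pvOmin]; cases acc <;> rfl
  | cons k t ih =>
    intro acc
    by_cases hk : m < k
    · have hstep : (if m < k && (match acc with | none => true | some b => k < b)
          then some k else acc) = pvOmin acc (some k) := by
        cases acc with
        | none => simp [hk, pvOmin]
        | some a =>
          by_cases hlt : k < a
          · simp [pvOmin, hk, hlt, min_eq_right (le_of_lt hlt)]
          · simp [pvOmin, hk, hlt, min_eq_left (le_of_not_gt hlt)]
      simp only [List.foldl_cons, hstep, ih]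
      have hf : (k :: t).filter (fun k => decide (m < k))
          = k :: t.filter (fun k => decide (m < k)) := by
        simp [hk]
      rw [hf]
      have : pvM (k :: t.filter (fun k => decide (m < k)))
          = pvOmin (some k) (pvM (t.filter (fun k => decide (m < k)))) := rfl
      rw [this, ← pvOmin_assoc]
    · have hstep : (if m < k && (match acc with | none => true | some b => k < b)
          then some k else acc) = acc := by
        cases acc <;> simp [hk]
      have hf : (k :: t).filter (fun k => decide (m < k))
          = t.filter (fun k => decide (m < k)) := by
        simp [hk]
      simp only [List.foldl_cons, hstep, ih, hf]

theorem pvScanA_eq (m : Int) (ks : List Int) :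
    pvScanA m ks = pvM (ks.filter (fun k => decide (m < k))) := by
  unfold pvScanA
  rw [pvScanA_foldl_eq]
  rfl

theorem pvM_eq_none (l : List Int) : pvM l = none ↔ l = [] := by
  cases l with
  | nil => simp [pvM]
  | cons x t =>
    have h : pvM (x :: t) = pvOmin (some x) (pvM t) := rfl
    rw [h]
    cases pvM t <;> simp [pvOmin]

theorem pvM_some (l : List Int) (b : Int) (h : pvM l = some b) :
    b ∈ l ∧ ∀ x ∈ l, b ≤ x := by
  induction l generalizing b with
  | nil => simp [pvM] at h
  | cons x t ih =>
    simp only [pvM, List.foldr_cons] at h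
    cases ht : (t.foldr (fun x o => pvOmin (some x) o) none) with
    | none =>
      rw [ht] at h
      simp [pvOmin] at h
      have htn : t = [] := (pvM_eq_none t).mp ht
      subst htn h
      simp
    | some c =>
      rw [ht] at h
      simp only [pvOmin] at h
      have hc := ih c ht
      have hb : b = min x c := by simpa using h.symm
      subst hb
      constructor
      · rcases le_total x c with hxc | hcx
        · simp [min_eq_left hxc]
        · simp [min_eq_right hcx]
          right; exact hc.1
      · intro y hy
        rcases List.mem_cons.mp hy with rfl | hyt
        · exact min_le_left _ _
        · exact le_trans (min_le_right _ _) (hc.2 y hyt)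

theorem pvChain_eq (d : PySem.Dict Int Int) (ks : List Int) :
    ∀ (s : List Int) (m : Int) (fuel : Nat),
    s.Pairwise (· < ·) →
    (∀ x, x ∈ s ↔ (x ∈ ks ∧ m < x)) →
    s.length ≤ fuel →
    pvLoopA d ks fuel m = s.map (fun k => (k, d.getD k 0)) := by
  intro s
  induction s with
  | nil =>
    intro m fuel _ hmem _
    have hfilt : ks.filter (fun k => decide (m < k)) = [] := by
      apply List.eq_nil_iff_forall_not_mem.mpr
      intro x hx
      have := List.mem_filter.mp hx
      exact (List.not_mem_nil (a := x)).elim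
        (((hmem x).mpr ⟨this.1, by simpa using this.2⟩))
    have hscan : pvScanA m ks = none := by
      rw [pvScanA_eq, hfilt]; rfl
    cases fuel with
    | zero => rfl
    | succ f => simp [pvLoopA, hscan]
  | cons r rest ih =>
    intro m fuel hpw hmem hlen
    cases fuel with
    | zero => simp at hlen
    | succ f =>
      have hrmem : r ∈ ks ∧ m < r := (hmem r).mp (List.mem_cons_self)
      have hrfilt : r ∈ ks.filter (fun k => decide (m < k)) :=
        List.mem_filter.mpr ⟨hrmem.1, by simpa using hrmem.2⟩
      have hscan : pvScanA m ks = some r := by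
        rw [pvScanA_eq]
        cases hM : pvM (ks.filter (fun k => decide (m < k))) with
        | none =>
          have := (pvM_eq_none _).mp hM
          rw [this] at hrfilt; simp at hrfilt
        | some b =>
          obtain ⟨hbmem, hblb⟩ := pvM_some _ _ hM
          have hb1 := List.mem_filter.mp hbmem
          have hbks : b ∈ ks := hb1.1
          have hmb : m < b := by simpa using hb1.2
          have hbs : b ∈ r :: rest := (hmem b).mpr ⟨hbks, hmb⟩
          have hble : b ≤ r := hblb r hrfilt
          rcases List.mem_cons.mp hbs with rfl | hbrest
          · rfl
          · have : r < b := (List.pairwise_cons.mp hpw).1 b hbrest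
            omega
      have hmem' : ∀ x, x ∈ rest ↔ (x ∈ ks ∧ r < x) := by
        intro x
        constructor
        · intro hx
          have hxs : x ∈ r :: rest := List.mem_cons_of_mem _ hx
          have := (hmem x).mp hxs
          exact ⟨this.1, (List.pairwise_cons.mp hpw).1 x hx⟩
        · rintro ⟨hxks, hrx⟩
          have hmx : m < x := lt_trans hrmem.2 hrx
          rcases List.mem_cons.mp ((hmem x).mpr ⟨hxks, hmx⟩) with rfl | hx
          · omega
          · exact hx
      have hrec := ih r f (List.pairwise_cons.mp hpw).2 hmem' (by simpa using hlen)
      simp [pvLoopA, hscan, hrec]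

theorem pairwise_lt_of_le_nodup (l : List Int) (hle : l.Pairwise (· ≤ ·)) (hnd : l.Nodup) :
    l.Pairwise (· < ·) := by
  induction l with
  | nil => exact List.Pairwise.nil
  | cons x t ih =>
    rw [List.pairwise_cons] at hle ⊢
    rw [List.nodup_cons] at hnd
    refine ⟨fun y hy => lt_of_le_of_ne (hle.1 y hy) ?_, ih hle.2 hnd.2⟩
    intro h; exact hnd.1 (h ▸ hy)

theorem pvSel_eq_sorted (d : PySem.Dict Int Int) (ks : List Int) (hnd : ks.Nodup) :
    (match PySem.List.min? ks (fun x => x) with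
     | none => ([] : List (Int × Int))
     | some m => (m, d.getD m 0) :: pvLoopA d ks ks.length m)
    = (PySem.List.sorted ks (fun x => x) false).map (fun k => (k, d.getD k 0)) := by
  set s := PySem.List.sorted ks (fun x => x) false with hs
  have hperm : s.Perm ks := PySem.List.sorted_perm ks (fun x => x) false
  have hpw : s.Pairwise (· < ·) := by
    apply pairwise_lt_of_le_nodup
    · exact PySem.List.sorted_pairwise ks (fun x => x)
    · exact hperm.nodup_iff.mpr hnd
  cases hmin : PySem.List.min? ks (fun x => x) with
  | none =>
    have hksnil : ks = [] := (PySem.List.min?_eq_none_iff ks (fun x => x)).mp hmin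
    subst hksnil
    rfl
  | some m =>
    have hmmem : m ∈ ks := PySem.List.min?_mem hmin
    have hmlb : ∀ y ∈ ks, m ≤ y := by
      intro y hy
      simpa using PySem.List.min?_isMin hmin y hy
    cases hsc : s with
    | nil =>
      have hm : m ∈ s := hperm.mem_iff.mpr hmmem
      rw [hsc] at hm; simp at hm
    | cons c t =>
      have hclb : ∀ y ∈ ks, c ≤ y := by
        intro y hy
        simpa using PySem.List.key_head_sorted_le (xs := ks) (key := fun x => x) (hsc ▸ hs.symm) y hy
      have hcmem : c ∈ ks := hperm.mem_iff.mp (hsc ▸ List.mem_cons_self)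
      have hcm : c = m := le_antisymm (hclb m hmmem) (hmlb c hcmem)
      subst hcm
      rw [hsc] at hpw
      have hpwc := List.pairwise_cons.mp hpw
      have hmemt : ∀ x, x ∈ t ↔ (x ∈ ks ∧ c < x) := by
        intro x
        constructor
        · intro hx
          refine ⟨hperm.mem_iff.mp (hsc ▸ List.mem_cons_of_mem _ hx), hpwc.1 x hx⟩
        · rintro ⟨hxks, hcx⟩
          have hxs : x ∈ s := hperm.mem_iff.mpr hxks
          rw [hsc] at hxs
          rcases List.mem_cons.mp hxs with rfl | hx
          · omega
          · exact hx
      have hlent : t.length ≤ ks.length := by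
        have hl : s.length = ks.length := hperm.length_eq
        rw [hsc] at hl
        simp at hl
        omega
      have hrec := pvChain_eq d ks t c ks.length hpwc.2 hmemt hlent
      simp [hrec]

-- ===== VERDICT (by name: the statement is the Claim_ definition above) =====
theorem min_key_order_spec : Claim_equal_min_key_order := by
  intro adict _
  unfold Spec_min_key_order min_key_order min_key_order_alt
  exact pvSel_eq_sorted (PySem.Dict.ofList adict) (PySem.Dict.ofList adict).keys
    (PySem.Dict.nodup_keys_ofList adict)
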